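/- GENERATED by c/gen_decode.py: decode facts of the image, one per distinct instruction byte string. -/
import UserX.DecodeImage

#decode_all Toy.Dec
  "410fb6842400121400"  -- movzx eax,BYTE PTR [r12+0x141200]
  "4883c001"  -- add rax,0x1
  "48c1eb03"  -- shr rbx,0x3
  "4c89e6"  -- mov rsi,r12
  "7f27"  -- jg 10506f
  "bf00191400"  -- mov edi,0x141900
  "e870b0ffff"  -- call 1003c0
  "eb38"  -- jmp 105270
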